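-- pv_equiv track=rewrite | github.com/xion-learn/learn-python | crawler.py | get_pictures_urls
-- ===== SOURCE A (Python) =====
-- def get_pictures_urls(text):
--     st = 'data-original=\\"'
--     m = len(st)
--     i = 0
--     n = len(text)
--     urls = []  # 储存url
--     while i < n:
--         if text[i:i + m] == st:
--             url = ''
--             for j in range(i + m, n):
--                 if text[j] == '\\':
--                     i = j
--                     urls.append(url)
--                     break
--                 url += text[j]
--         i += 1
--     return urls
-- ===== SOURCE B (Python) =====
-- def get_pictures_urls(text):
--     marker = 'data-original=\\"'
--     urls = []
--     i = text.find(marker)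
--     while i != -1:
--         start = i + len(marker)
--         end = text.find('\\', start)
--         if end == -1:
--             break
--         urls.append(text[start:end])
--         i = text.find(marker, end + 1)
--     return urls
-- ===== Notes on version B (the rewrite author's own statement) =====
-- stated objective: faster
-- what changed: Replaces the per-index slice comparison with nested char-by-char URL accumulation by str.find jumps: locate each marker with find, locate the terminating backslash with find, and slice the URL out, resuming the search past the terminator.
import Mathlib
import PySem

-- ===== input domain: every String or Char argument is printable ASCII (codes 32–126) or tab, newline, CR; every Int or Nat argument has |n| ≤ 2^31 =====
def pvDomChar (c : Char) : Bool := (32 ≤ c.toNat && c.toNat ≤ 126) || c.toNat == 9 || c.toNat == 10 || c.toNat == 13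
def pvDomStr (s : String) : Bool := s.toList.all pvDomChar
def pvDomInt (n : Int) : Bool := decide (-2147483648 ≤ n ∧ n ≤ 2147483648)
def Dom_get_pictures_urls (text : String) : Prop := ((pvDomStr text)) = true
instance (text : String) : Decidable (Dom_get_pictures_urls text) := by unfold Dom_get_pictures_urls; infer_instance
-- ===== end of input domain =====

-- B replaces A's per-index slice comparison and char-by-char URL accumulation by str.find
-- jumps between marker and terminating backslash, slicing the URL out (objective: faster).

-- ===== PORT A =====
-- inner `for j in range(i+m, n)` loop of A: builds `url` char by char, breaks at '\'
-- returning some (j, url); falling off the range returns none (A appends nothing then).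
def pvInnerA (cs : List Char) (n j : Nat) (url : List Char) : Option (Nat × List Char) :=
  if _h : j < n then
    -- text[j]: j < n = len(text), so always in range; the `.getD` default is never read
    let c := (PySem.List.pyGet? cs (j : Int)).getD ' '
    if c = '\\' then some (j, url)
    else pvInnerA cs n (j + 1) (url ++ [c])
  else none
termination_by n - j

-- outer `while i < n` loop of A; one fuel unit per iteration (i strictly increases,
-- so n + 1 units suffice; the fuel only makes the recursion structural)
def pvOuterA (cs marker : List Char) (m n : Nat) : Nat → Nat → List String → List String
  | 0, _, urls => urls
  | fuel + 1, i, urls =>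
    if i < n then
      if PySem.List.slice cs (some (i : Int)) (some ((i : Int) + (m : Int))) = marker then
        match pvInnerA cs n (i + m) [] with
        | some (j, url) => pvOuterA cs marker m n fuel (j + 1) (urls ++ [String.ofList url])
        | none => pvOuterA cs marker m n fuel (i + 1) urls
      else pvOuterA cs marker m n fuel (i + 1) urls
    else urls

def get_pictures_urls (text : String) : List String :=
  let st : List Char := "data-original=\\\"".toList
  let m := st.length
  let n := text.toList.length
  pvOuterA text.toList st m n (n + 1) 0 []

-- ===== PORT B =====
-- B's `while i != -1` loop; i jumps via find; one fuel unit per found URL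
-- (each iteration moves i strictly forward, so len + 1 units suffice)
def pvLoopB (cs marker : List Char) : Nat → Int → List String → List String
  | 0, _, urls => urls
  | fuel + 1, i, urls =>
    if i ≠ -1 then
      let start : Int := i + (marker.length : Int)
      let e := PySem.Chars.findFrom cs ['\\'] start
      if e = -1 then urls
      else
        pvLoopB cs marker fuel (PySem.Chars.findFrom cs marker (e + 1))
          (urls ++ [String.ofList (PySem.List.slice cs (some start) (some e))])
    else urls

def get_pictures_urls_alt (text : String) : List String :=
  let marker : List Char := "data-original=\\\"".toList
  pvLoopB text.toList marker (text.toList.length + 1)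
    (PySem.Chars.find text.toList marker) []

-- ===== PRECONDITION & SPEC =====
def Spec_get_pictures_urls (text : String) (out : List String) : Prop := out = get_pictures_urls_alt text
instance (text : String) (out : List String) : Decidable (Spec_get_pictures_urls text out) := by unfold Spec_get_pictures_urls; infer_instance

-- ===== CLAIM (what is proved, stated in full; the proofs are below) =====
def Claim_equal_get_pictures_urls : Prop := ∀ (text : String), Dom_get_pictures_urls text → Spec_get_pictures_urls text (get_pictures_urls text)

-- ===== LEMMAS AND PROOFS =====

-- a one-char list is a prefix of `cs.drop q` iff that char sits at index q
lemma pvSingleton_prefix_iff (cs : List Char) (q : Nat) (c : Char) :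
    [c] <+: cs.drop q ↔ cs[q]? = some c := by
  rw [← List.head?_drop]
  constructor
  · rintro ⟨t, ht⟩; rw [← ht]; rfl
  · intro h
    cases hd : cs.drop q with
    | nil => rw [hd] at h; simp at h
    | cons a t => rw [hd] at h; simp at h; subst h; exact ⟨t, rfl⟩

-- the slice test of A is exactly the prefix test at index i
lemma pvSlice_eq_iff (cs marker : List Char) (i : Nat) :
    PySem.List.slice cs (some (i : Int)) (some ((i : Int) + (marker.length : Int))) = marker
      ↔ marker <+: cs.drop i := by
  have hcast : (i : Int) + (marker.length : Int) = ((i + marker.length : Nat) : Int) := by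
    push_cast; ring
  rw [hcast, PySem.List.slice_natCast, show i + marker.length - i = marker.length by omega,
    List.prefix_iff_eq_take]
  exact ⟨fun h => h.symm, fun h => h.symm⟩

-- an infix of `cs.drop k` is a prefix occurrence at some index j ≥ k
lemma pvInfix_drop_iff (cs sub : List Char) (k : Nat) :
    sub <:+: cs.drop k ↔ ∃ j, k ≤ j ∧ sub <+: cs.drop j := by
  constructor
  · intro h
    obtain ⟨t, hpre, hsuf⟩ := List.infix_iff_prefix_suffix.mp h
    rw [List.suffix_iff_eq_drop] at hsuf
    refine ⟨k + ((cs.drop k).length - t.length), by omega, ?_⟩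
    rw [← List.drop_drop, ← hsuf]
    exact hpre
  · rintro ⟨j, hkj, hpre⟩
    have hdj : cs.drop j = (cs.drop k).drop (j - k) := by
      rw [List.drop_drop]; congr 1; omega
    rw [hdj] at hpre
    exact hpre.isInfix.trans (List.drop_suffix _ _).isInfix

-- findFrom from a Nat start equals a Nat q iff q is the least index ≥ k with an occurrence
lemma pvFindFrom_eq_iff (cs sub : List Char) (k q : Nat) (hk : k ≤ cs.length) :
    PySem.Chars.findFrom cs sub (k : Int) = (q : Int)
      ↔ (k ≤ q ∧ sub <+: cs.drop q ∧ ∀ i, k ≤ i → i < q → ¬ sub <+: cs.drop i) := by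
  constructor
  · intro h
    have hne : PySem.Chars.findFrom cs sub (k : Int) ≠ -1 := by rw [h]; omega
    obtain ⟨h1, h2, h3⟩ := PySem.Chars.findFrom_natCast_spec cs sub k hk hne
    have hq : (PySem.Chars.findFrom cs sub (k : Int)).toNat = q := by
      rw [h]; exact Int.toNat_natCast q
    rw [hq] at h2 h3
    rw [h] at h1
    exact ⟨by exact_mod_cast h1, h2, h3⟩
  · rintro ⟨h1, h2, h3⟩
    have hne : PySem.Chars.findFrom cs sub (k : Int) ≠ -1 := fun hv =>
      ((PySem.Chars.findFrom_natCast_eq_neg_one_iff cs sub k hk).mp hv)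
        ((pvInfix_drop_iff cs sub k).mpr ⟨q, h1, h2⟩)
    obtain ⟨g1, g2, g3⟩ := PySem.Chars.findFrom_natCast_spec cs sub k hk hne
    have hk' : k ≤ (PySem.Chars.findFrom cs sub (k : Int)).toNat := by omega
    have heq : (PySem.Chars.findFrom cs sub (k : Int)).toNat = q := by
      rcases Nat.lt_trichotomy (PySem.Chars.findFrom cs sub (k : Int)).toNat q with hlt | he | hgt
      · exact absurd g2 (h3 _ hk' hlt)
      · exact he
      · exact absurd h2 (g3 q h1 hgt)
    have hr0 : (0 : Int) ≤ PySem.Chars.findFrom cs sub (k : Int) := by omega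
    rw [← Int.toNat_of_nonneg hr0, heq]

-- no occurrence at k: the search from k equals the search from k + 1
lemma pvFindFrom_step (cs sub : List Char) (k : Nat) (hk : k < cs.length)
    (h : ¬ sub <+: cs.drop k) :
    PySem.Chars.findFrom cs sub (k : Int) = PySem.Chars.findFrom cs sub ((k + 1 : Nat) : Int) := by
  by_cases hin : sub <:+: cs.drop (k + 1)
  · have hne : PySem.Chars.findFrom cs sub ((k + 1 : Nat) : Int) ≠ -1 := fun hv =>
      ((PySem.Chars.findFrom_natCast_eq_neg_one_iff cs sub (k + 1) (by omega)).mp hv) hin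
    obtain ⟨g1, g2, g3⟩ := PySem.Chars.findFrom_natCast_spec cs sub (k + 1) (by omega) hne
    have hr0 : (0 : Int) ≤ PySem.Chars.findFrom cs sub ((k + 1 : Nat) : Int) := by omega
    have hmain : PySem.Chars.findFrom cs sub (k : Int)
        = (((PySem.Chars.findFrom cs sub ((k + 1 : Nat) : Int)).toNat : Nat) : Int) := by
      rw [pvFindFrom_eq_iff cs sub k _ (by omega)]
      refine ⟨by omega, g2, ?_⟩
      intro i hki hir hpre
      rcases Nat.eq_or_lt_of_le hki with rfl | hlt
      · exact h hpre
      · exact g3 i hlt hir hpre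
    rw [hmain, Int.toNat_of_nonneg hr0]
  · have h1 : PySem.Chars.findFrom cs sub ((k + 1 : Nat) : Int) = -1 :=
      (PySem.Chars.findFrom_natCast_eq_neg_one_iff cs sub (k + 1) (by omega)).mpr hin
    have h0 : PySem.Chars.findFrom cs sub (k : Int) = -1 := by
      rw [PySem.Chars.findFrom_natCast_eq_neg_one_iff cs sub k (by omega)]
      intro hin0
      obtain ⟨j, hkj, hpre⟩ := (pvInfix_drop_iff cs sub k).mp hin0
      rcases Nat.eq_or_lt_of_le hkj with rfl | hlt
      · exact h hpre
      · exact hin ((pvInfix_drop_iff cs sub (k + 1)).mpr ⟨j, by omega, hpre⟩)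
    rw [h0, h1]

-- a failed search stays failed from any later start
lemma pvFindFrom_mono_neg (cs sub : List Char) (t j : Nat) (ht : t ≤ j) (hj : j ≤ cs.length)
    (h : PySem.Chars.findFrom cs sub (t : Int) = -1) :
    PySem.Chars.findFrom cs sub (j : Int) = -1 := by
  rw [PySem.Chars.findFrom_natCast_eq_neg_one_iff cs sub t (by omega)] at h
  rw [PySem.Chars.findFrom_natCast_eq_neg_one_iff cs sub j hj]
  intro hin
  obtain ⟨j', hjj', hpre⟩ := (pvInfix_drop_iff cs sub j).mp hin
  exact h ((pvInfix_drop_iff cs sub t).mpr ⟨j', by omega, hpre⟩)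

-- A's inner loop finds nothing exactly when the backslash search fails
lemma pvInnerA_none (cs : List Char) : ∀ (j : Nat) (url : List Char), j ≤ cs.length →
    PySem.Chars.findFrom cs ['\\'] (j : Int) = -1 →
    pvInnerA cs cs.length j url = none := by
  suffices H : ∀ (d j : Nat) (url : List Char), cs.length - j ≤ d → j ≤ cs.length →
      PySem.Chars.findFrom cs ['\\'] (j : Int) = -1 →
      pvInnerA cs cs.length j url = none by
    exact fun j url hj h => H (cs.length - j) j url le_rfl hj h
  intro d
  induction d with
  | zero =>
    intro j url hd hj h
    rw [pvInnerA]; simp [show ¬ j < cs.length by omega]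
  | succ d ih =>
    intro j url hd hj h
    by_cases hlt : j < cs.length
    · rw [pvInnerA, dif_pos hlt]
      have hget : PySem.List.pyGet? cs ((j : Nat) : Int) = some cs[j] := by
        rw [PySem.List.pyGet?_natCast, List.getElem?_eq_getElem hlt]
      by_cases hc : cs[j] = '\\'
      · exfalso
        have : PySem.Chars.findFrom cs ['\\'] (j : Int) = (j : Int) := by
          rw [pvFindFrom_eq_iff cs _ j j hj]
          exact ⟨le_rfl, (pvSingleton_prefix_iff cs j '\\').mpr
            (by rw [List.getElem?_eq_getElem hlt, hc]), fun i h1 h2 _ => by omega⟩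
        rw [this] at h; omega
      · simp only [hget, Option.getD_some, if_neg hc]
        apply ih _ _ (by omega) (by omega)
        have hnp : ¬ ['\\'] <+: cs.drop j := by
          rw [pvSingleton_prefix_iff, List.getElem?_eq_getElem hlt]
          simpa using hc
        rw [← pvFindFrom_step cs _ j hlt hnp]
        exact h
    · rw [pvInnerA]; simp [hlt]

-- A's inner loop breaks at the backslash the search finds, with the slice as url
lemma pvInnerA_some (cs : List Char) : ∀ (j : Nat) (url : List Char) (q : Nat), j ≤ cs.length →
    PySem.Chars.findFrom cs ['\\'] (j : Int) = (q : Int) →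
    pvInnerA cs cs.length j url = some (q, url ++ (cs.drop j).take (q - j)) := by
  suffices H : ∀ (d j : Nat) (url : List Char) (q : Nat), cs.length - j ≤ d → j ≤ cs.length →
      PySem.Chars.findFrom cs ['\\'] (j : Int) = (q : Int) →
      pvInnerA cs cs.length j url = some (q, url ++ (cs.drop j).take (q - j)) by
    exact fun j url q hj h => H (cs.length - j) j url q le_rfl hj h
  intro d
  induction d with
  | zero =>
    intro j url q hd hj h
    exfalso
    have hj' : j = cs.length := by omega
    subst hj'
    have : PySem.Chars.findFrom cs ['\\'] ((cs.length : Nat) : Int) = -1 := by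
      rw [PySem.Chars.findFrom_natCast_eq_neg_one_iff cs _ _ le_rfl, List.drop_length]
      simp [List.infix_nil]
    rw [this] at h; omega
  | succ d ih =>
    intro j url q hd hj h
    by_cases hlt : j < cs.length
    · obtain ⟨h1, h2, h3⟩ := (pvFindFrom_eq_iff cs _ j q hj).mp h
      rw [pvInnerA, dif_pos hlt]
      have hget : PySem.List.pyGet? cs ((j : Nat) : Int) = some cs[j] := by
        rw [PySem.List.pyGet?_natCast, List.getElem?_eq_getElem hlt]
      by_cases hc : cs[j] = '\\'
      · have hqj : q = j := by
          rcases Nat.eq_or_lt_of_le h1 with he | hgt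
          · omega
          · exact absurd ((pvSingleton_prefix_iff cs j '\\').mpr
              (by rw [List.getElem?_eq_getElem hlt, hc])) (h3 j le_rfl hgt)
        simp only [hget, Option.getD_some, if_pos hc, hqj]
        simp
      · have hnp : ¬ ['\\'] <+: cs.drop j := by
          rw [pvSingleton_prefix_iff, List.getElem?_eq_getElem hlt]
          simpa using hc
        have hstep : PySem.Chars.findFrom cs ['\\'] ((j + 1 : Nat) : Int) = (q : Int) := by
          rw [← pvFindFrom_step cs _ j hlt hnp]; exact h
        have hjq : j < q := by
          rcases Nat.eq_or_lt_of_le h1 with he | hgt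
          · exfalso; apply hnp; rw [he]; exact h2
          · exact hgt
        simp only [hget, Option.getD_some, if_neg hc]
        rw [ih (j + 1) (url ++ [cs[j]]) q (by omega) (by omega) hstep]
        rw [List.drop_eq_getElem_cons hlt,
          show q - j = (q - (j + 1)) + 1 by omega, List.take_succ_cons]
        simp
    · exfalso
      have hj' : j = cs.length := by omega
      subst hj'
      have : PySem.Chars.findFrom cs ['\\'] ((cs.length : Nat) : Int) = -1 := by
        rw [PySem.Chars.findFrom_natCast_eq_neg_one_iff cs _ _ le_rfl, List.drop_length]
        simp [List.infix_nil]
      rw [this] at h; omega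

-- if no backslash occurs from index t on, A's outer loop appends nothing
lemma pvOuterA_no_backslash (cs marker : List Char) (t : Nat)
    (h : PySem.Chars.findFrom cs ['\\'] (t : Int) = -1) :
    ∀ fuel i urls, i ≤ cs.length → t ≤ i + marker.length →
      pvOuterA cs marker marker.length cs.length fuel i urls = urls := by
  intro fuel
  induction fuel with
  | zero => intro i urls _ _; rw [pvOuterA]
  | succ fuel ih =>
    intro i urls hi hti
    rw [pvOuterA]
    by_cases hlt : i < cs.length
    · rw [if_pos hlt]
      by_cases hp : PySem.List.slice cs (some (i : Int)) (some ((i : Int) + (marker.length : Int))) = marker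
      · rw [if_pos hp]
        have hpre : marker <+: cs.drop i := (pvSlice_eq_iff cs marker i).mp hp
        have him : i + marker.length ≤ cs.length := by
          have := hpre.length_le
          rw [List.length_drop] at this
          omega
        have hbs : PySem.Chars.findFrom cs ['\\'] ((i + marker.length : Nat) : Int) = -1 :=
          pvFindFrom_mono_neg cs _ t (i + marker.length) hti him h
        rw [pvInnerA_none cs (i + marker.length) [] him hbs]
        exact ih (i + 1) urls (by omega) (by omega)
      · rw [if_neg hp]
        exact ih (i + 1) urls (by omega) (by omega)
    · rw [if_neg hlt]

-- main correspondence: A's scan from i equals B's loop started at the marker search from i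
lemma pvMain (cs marker : List Char) (hm : marker ≠ []) :
    ∀ fuelA i urls fuelB, i ≤ cs.length → cs.length - i < fuelA → cs.length - i < fuelB →
      pvOuterA cs marker marker.length cs.length fuelA i urls =
        pvLoopB cs marker fuelB (PySem.Chars.findFrom cs marker (i : Int)) urls := by
  intro fuelA
  induction fuelA with
  | zero => intro i urls fuelB hi hA hB; omega
  | succ fuelA ih =>
    intro i urls fuelB hi hA hB
    obtain ⟨fB, rfl⟩ : ∃ fB, fuelB = fB + 1 := ⟨fuelB - 1, by omega⟩
    by_cases hlt : i < cs.length
    · rw [pvOuterA, if_pos hlt]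
      by_cases hp : marker <+: cs.drop i
      · have hsl : PySem.List.slice cs (some (i : Int)) (some ((i : Int) + (marker.length : Int))) = marker :=
          (pvSlice_eq_iff cs marker i).mpr hp
        rw [if_pos hsl]
        have him : i + marker.length ≤ cs.length := by
          have := hp.length_le
          rw [List.length_drop] at this
          omega
        have hfi : PySem.Chars.findFrom cs marker (i : Int) = (i : Int) := by
          rw [pvFindFrom_eq_iff cs marker i i hi]
          exact ⟨le_rfl, hp, fun j h1 h2 _ => by omega⟩
        rw [hfi, pvLoopB, if_pos (show (i : Int) ≠ -1 by omega)]
        have hcast : (i : Int) + (marker.length : Int) = ((i + marker.length : Nat) : Int) := by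
          push_cast; ring
        rcases eq_or_ne (PySem.Chars.findFrom cs ['\\'] ((i + marker.length : Nat) : Int)) (-1)
          with hbs | hbs
        · -- no backslash after this marker: A appends nothing from here on, B stops
          rw [pvInnerA_none cs (i + marker.length) [] him hbs]
          simp only [hcast, hbs]
          exact pvOuterA_no_backslash cs marker (i + marker.length) hbs fuelA (i + 1) urls
            (by omega) (by omega)
        · -- backslash at q: both append the slice and resume at q + 1
          have hr0 : (0 : Int) ≤ PySem.Chars.findFrom cs ['\\'] ((i + marker.length : Nat) : Int) := by
            obtain ⟨g1, _, _⟩ := PySem.Chars.findFrom_natCast_spec cs ['\\'] (i + marker.length) him hbs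
            omega
          set q := (PySem.Chars.findFrom cs ['\\'] ((i + marker.length : Nat) : Int)).toNat with hqdef
          have hq : PySem.Chars.findFrom cs ['\\'] ((i + marker.length : Nat) : Int) = (q : Int) := by
            rw [hqdef, Int.toNat_of_nonneg hr0]
          obtain ⟨hq1, hq2, _⟩ := (pvFindFrom_eq_iff cs ['\\'] (i + marker.length) q him).mp hq
          have hqlen : q < cs.length := by
            rw [pvSingleton_prefix_iff] at hq2
            exact List.getElem?_eq_some_iff.mp hq2 |>.choose
          rw [pvInnerA_some cs (i + marker.length) [] q him hq]
          simp only [List.nil_append]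
          simp only [hcast, hq]
          rw [if_neg (show (q : Int) ≠ -1 by omega)]
          rw [PySem.List.slice_natCast]
          have hq1' : (q : Int) + 1 = ((q + 1 : Nat) : Int) := by push_cast; ring
          rw [hq1']
          exact ih (q + 1) _ fB (by omega) (by omega) (by omega)
      · have hsl : ¬ PySem.List.slice cs (some (i : Int)) (some ((i : Int) + (marker.length : Int))) = marker := by
          rw [pvSlice_eq_iff cs marker i]; exact hp
        rw [if_neg hsl]
        rw [pvFindFrom_step cs marker i hlt hp]
        exact ih (i + 1) urls (fB + 1) (by omega) (by omega) (by omega)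
    · have hie : i = cs.length := by omega
      subst hie
      rw [pvOuterA, if_neg hlt]
      have hfi : PySem.Chars.findFrom cs marker ((cs.length : Nat) : Int) = -1 := by
        rw [PySem.Chars.findFrom_natCast_eq_neg_one_iff cs marker _ le_rfl, List.drop_length]
        simpa [List.infix_nil] using hm
      rw [hfi, pvLoopB]
      simp

-- ===== VERDICT (by name: the statement is the Claim_ definition above) =====
theorem get_pictures_urls_spec : Claim_equal_get_pictures_urls := by
  intro text _
  show pvOuterA text.toList "data-original=\\\"".toList "data-original=\\\"".toList.length
      text.toList.length (text.toList.length + 1) 0 [] =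
    pvLoopB text.toList "data-original=\\\"".toList (text.toList.length + 1)
      (PySem.Chars.find text.toList "data-original=\\\"".toList) []
  rw [← PySem.Chars.findFrom_zero]
  have hmain := pvMain text.toList "data-original=\\\"".toList (by decide)
    (text.toList.length + 1) 0 [] (text.toList.length + 1) (Nat.zero_le _) (by omega) (by omega)
  simpa using hmain
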